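-- pv_equiv track=rewrite | github.com/hbcbh1999/AIprojects | PR/CL/wd.py | catFrec
-- ===== SOURCE A (Python) =====
-- def catFrec(cat):
--     DC = {}
--     for i in cat:
--         if i in DC:
--             DC[i] += 1
--         else:
--             DC[i] = 1
--     return ordenar(DC)
--
-- def ordenar(dic):
--     s = {}
--     aux = sorted(dic)
--     for i in aux:
--         s[i] = dic[i]
--     return s;
-- ===== SOURCE B (Python) =====
-- def catFrec(cat):
--     res = {}
--     prev = None
--     for x in sorted(cat):
--         if x == prev:
--             res[x] += 1
--         else:
--             res[x] = 1
--             prev = x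
--     return res
-- ===== Notes on version B (the rewrite author's own statement) =====
-- stated objective: alternative
-- what changed: B sorts the whole input once and counts runs of consecutive equal elements against the previous element, emitting the key-sorted dict in one grouping pass, instead of A's hash-count pass followed by a separate key-sort-and-rebuild pass.
import Mathlib
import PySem

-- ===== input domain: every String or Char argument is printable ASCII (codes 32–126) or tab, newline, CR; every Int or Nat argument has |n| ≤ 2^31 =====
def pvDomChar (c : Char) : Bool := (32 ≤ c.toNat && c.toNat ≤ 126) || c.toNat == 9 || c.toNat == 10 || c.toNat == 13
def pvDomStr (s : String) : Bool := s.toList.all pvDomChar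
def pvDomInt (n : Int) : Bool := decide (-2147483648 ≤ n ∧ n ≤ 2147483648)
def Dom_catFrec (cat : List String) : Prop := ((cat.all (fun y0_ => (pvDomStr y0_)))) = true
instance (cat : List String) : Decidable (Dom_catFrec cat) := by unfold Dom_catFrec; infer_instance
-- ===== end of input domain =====

-- B replaces A's count-then-sort-keys scheme by sort-then-group-consecutive (alternative decomposition, same results).

-- ===== PORT A =====
-- helper 'ordenar(dic)': s = {}; for i in sorted(dic): s[i] = dic[i]; return s
-- 'dic[i]' is ported as 'dic.getD i 0': exact here, since every i comes from dic's own keys (no KeyError possible).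
def ordenar (dic : PySem.Dict String Int) : List (String × Int) :=
  ((PySem.List.sorted dic.keys (fun k => k)).foldl
      (fun s i => s.insert i (dic.getD i 0)) PySem.Dict.empty).items

def catFrec (cat : List String) : List (String × Int) :=
  ordenar (cat.foldl
    (fun DC i => if DC.contains i then DC.modify i 0 (· + 1) else DC.insert i 1)
    PySem.Dict.empty)

-- ===== PORT B =====
-- res = {}; prev = None; for x in sorted(cat): if x == prev: res[x] += 1 else: res[x] = 1; prev = x
-- 'res[x] += 1' is ported as 'modify x 0 (· + 1)': exact here, since x == prev guarantees x is already a key.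
def catFrec_alt (cat : List String) : List (String × Int) :=
  ((PySem.List.sorted cat (fun x => x)).foldl
      (fun (st : PySem.Dict String Int × Option String) x =>
        if some x = st.2 then (st.1.modify x 0 (· + 1), st.2)
        else (st.1.insert x 1, some x))
      (PySem.Dict.empty, none)).1.items

-- ===== PRECONDITION & SPEC =====
def Spec_catFrec (cat : List String) (out : List (String × Int)) : Prop := out = catFrec_alt cat
instance (cat : List String) (out : List (String × Int)) : Decidable (Spec_catFrec cat out) := by unfold Spec_catFrec; infer_instance

-- ===== CLAIM (what is proved, stated in full; the proofs are below) =====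
def Claim_equal_catFrec : Prop := ∀ (cat : List String), Dom_catFrec cat → Spec_catFrec cat (catFrec cat)

-- ===== LEMMAS AND PROOFS =====

-- inserting a fresh key with value 1 is the same dict as the counter's modify step
lemma insert_one_eq_modify (d : PySem.Dict String Int) (x : String)
    (h : d.contains x = false) : d.insert x 1 = d.modify x 0 (· + 1) := by
  simp [PySem.Dict.modify, PySem.Dict.getD_of_not_contains _ _ h]

-- A's counting loop body equals the Counter step for every dict
lemma stepA_eq (d : PySem.Dict String Int) (x : String) :
    (if d.contains x then d.modify x 0 (· + 1) else d.insert x 1) = d.modify x 0 (· + 1) := by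
  by_cases h : d.contains x = true
  · simp [h]
  · simp only [Bool.not_eq_true] at h
    simp [h, insert_one_eq_modify d x h]

-- A's DC dict is Counter(cat)
lemma DC_eq (cat : List String) :
    cat.foldl (fun DC i => if DC.contains i then DC.modify i 0 (· + 1) else DC.insert i 1)
      PySem.Dict.empty = PySem.Dict.counter cat := by
  rw [PySem.Dict.counter_eq_foldl]
  exact PySem.List.foldl_congr_mem _ _ _ _ (fun acc x _ => stepA_eq acc x)

-- set(xs) (first occurrences in order) is a sublist of xs
lemma ofList_sublist (xs : List String) : (PySem.Set.ofList xs).Sublist xs := by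
  induction xs with
  | nil => simp [PySem.Set.ofList_nil]
  | cons x t ih =>
      rw [PySem.Set.ofList_cons]
      exact List.Sublist.cons₂ x (List.Sublist.trans List.filter_sublist ih)

-- on a sorted (hence runs-adjacent) list, B's previous-element loop computes the Counter fold
lemma loopB (l : List String) : ∀ (d : PySem.Dict String Int) (cur : Option String),
    l.Pairwise (· ≤ ·) →
    (∀ y ∈ l, d.contains y = true → some y = cur) →
    (∀ y, cur = some y → ∀ z ∈ l, y ≤ z) →
    (l.foldl
        (fun (st : PySem.Dict String Int × Option String) x =>
          if some x = st.2 then (st.1.modify x 0 (· + 1), st.2)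
          else (st.1.insert x 1, some x)) (d, cur)).1
      = l.foldl (fun d x => d.modify x 0 (· + 1)) d := by
  induction l with
  | nil => intros; rfl
  | cons x t ih =>
      intro d cur hpw H G
      obtain ⟨hhead, htail⟩ := List.pairwise_cons.1 hpw
      simp only [List.foldl_cons]
      by_cases hx : some x = cur
      · rw [if_pos hx]
        subst hx
        apply ih _ _ htail
        · intro y hy hc
          rw [PySem.Dict.contains_modify] at hc
          rcases Bool.or_eq_true_iff.1 hc with h1 | h2
          · exact congrArg some (eq_of_beq h1)
          · exact H y (List.mem_cons_of_mem _ hy) h2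
        · intro y hy z hz
          cases hy; exact hhead z hz
      · rw [if_neg hx]
        have hcx : d.contains x = false := by
          cases h : d.contains x with
          | false => rfl
          | true => exact absurd (H x (List.mem_cons_self) h) hx
        rw [insert_one_eq_modify d x hcx]
        apply ih _ _ htail
        · intro y hy hc
          rw [PySem.Dict.contains_modify] at hc
          rcases Bool.or_eq_true_iff.1 hc with h1 | h2
          · exact congrArg some (eq_of_beq h1)
          · have hyc := H y (List.mem_cons_of_mem _ hy) h2
            have hyx : y ≤ x := G y hyc.symm x List.mem_cons_self
            have hxy : x ≤ y := hhead y hy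
            exact congrArg some (le_antisymm hyx hxy)
        · intro y hy z hz
          cases hy; exact hhead z hz

-- the sorted key list of Counter(cat) is set(sorted(cat))
lemma keys_sorted_eq (cat : List String) :
    PySem.List.sorted (PySem.Set.ofList cat) (fun k => k)
      = PySem.Set.ofList (PySem.List.sorted cat (fun x => x)) := by
  apply PySem.List.sorted_eq_of_perm_of_pairwise_lt
  · refine (List.perm_ext_iff_of_nodup (PySem.Set.nodup_ofList _) (PySem.Set.nodup_ofList _)).2 ?_
    intro a
    simp [PySem.Set.mem_ofList, (PySem.List.sorted_perm cat (fun x => x) false).mem_iff]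
  · have hle : (PySem.Set.ofList (PySem.List.sorted cat (fun x => x))).Pairwise (· ≤ ·) :=
      (PySem.List.sorted_pairwise cat (fun x => x)).sublist (ofList_sublist _)
    have hne : (PySem.Set.ofList (PySem.List.sorted cat (fun x => x))).Pairwise (· ≠ ·) :=
      PySem.Set.nodup_ofList _
    exact (hle.and hne).imp (fun h => lt_of_le_of_ne h.1 h.2)

-- ===== VERDICT (by name: the statement is the Claim_ definition above) =====
theorem catFrec_spec : Claim_equal_catFrec := by
  intro cat _
  show catFrec cat = catFrec_alt cat
  have hB : catFrec_alt cat = (PySem.Dict.counter (PySem.List.sorted cat (fun x => x))).items := by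
    unfold catFrec_alt
    rw [loopB _ _ _ (PySem.List.sorted_pairwise cat (fun x => x))
        (fun y _ hc => by simp [PySem.Dict.contains_empty] at hc)
        (fun y hy => by cases hy)]
    rw [PySem.Dict.counter_eq_foldl]
  rw [hB, PySem.Dict.items_counter]
  unfold catFrec ordenar
  rw [DC_eq, PySem.Dict.keys_counter, keys_sorted_eq]
  have hnodup : (PySem.Set.ofList (PySem.List.sorted cat (fun x => x))).Nodup :=
    PySem.Set.nodup_ofList _
  rw [PySem.Dict.items_foldl_insert_fresh _ (fun i => i) _ _
      (fun a _ => PySem.Dict.contains_empty a) (by simpa using hnodup)]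
  simp only [PySem.Dict.getD_counter, PySem.Dict.empty, List.nil_append]
  refine List.map_congr_left (fun k _ => ?_)
  rw [(PySem.List.sorted_perm cat (fun x => x) false).count_eq k]
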